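-- pv_equiv track=rewrite | github.com/AmornP/2110101_memo | Part_II_practice/Part_II_Odd_Odd_Function.py | zip_odds
-- ===== SOURCE A (Python) =====
-- def is_odd(n):
--     return n%2 == 1
--
-- def get_odds(x):
--     return [j for j in x if is_odd(j)]
--
-- def zip_odds(a, b):
--
--     l1 = get_odds(a)
--     l2 = get_odds(b)
--     i = 0
--     payload = []
--     while len(l1) >= 0 and len(l2) >= 0 :
--
--         if i%2 == 0 :
--             if len(l1) > 0 :
--                 payload.append(l1.pop(0))
--             else :
--                 payload += l2
--                 break
--         else :
--             if len(l2) > 0 :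
--                 payload.append(l2.pop(0))
--             else :
--                 payload += l1
--                 break
--
--         i+=1
--
--     return payload
-- ===== SOURCE B (Python) =====
-- def zip_odds(a, b):
--     l1 = [x for x in a if x % 2 == 1]
--     l2 = [x for x in b if x % 2 == 1]
--     out = []
--     for p, q in zip(l1, l2):
--         out += [p, q]
--     n = min(len(l1), len(l2))
--     return out + l1[n:] + l2[n:]
-- ===== Notes on version B (the rewrite author's own statement) =====
-- stated objective: faster
-- what changed: Replaces A's toggle-index while loop with break and destructive pop(0) by a filter, a zip-and-flatten pass, and one tail concatenation of the longer odd-list's remainder.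
import Mathlib
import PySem

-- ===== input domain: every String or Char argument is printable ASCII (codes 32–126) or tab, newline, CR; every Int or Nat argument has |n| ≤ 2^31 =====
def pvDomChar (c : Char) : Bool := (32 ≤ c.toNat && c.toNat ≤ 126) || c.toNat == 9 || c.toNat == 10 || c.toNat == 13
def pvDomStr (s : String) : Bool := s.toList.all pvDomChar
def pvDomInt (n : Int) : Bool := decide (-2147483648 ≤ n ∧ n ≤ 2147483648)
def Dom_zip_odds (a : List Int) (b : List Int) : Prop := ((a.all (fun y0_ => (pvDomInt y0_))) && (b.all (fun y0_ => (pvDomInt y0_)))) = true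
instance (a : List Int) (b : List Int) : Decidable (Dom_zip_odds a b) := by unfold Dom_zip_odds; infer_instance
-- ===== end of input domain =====

-- B replaces A's toggle-index while loop with pop(0) by filter + zip-and-flatten + one tail concatenation (objective: simpler).


-- ===== PORT A =====
def is_odd (n : Int) : Bool := PySem.Int.mod n 2 == 1

def get_odds (x : List Int) : List Int := x.filter (fun j => is_odd j)

-- A's while loop: the `len >= 0` condition is always true; the loop either pops the
-- head of l1 or l2 (toggled by i) or breaks appending the other list's remainder.
def zipOddsLoop (l1 l2 : List Int) (i : Int) (payload : List Int) : List Int :=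
  if PySem.Int.mod i 2 == 0 then
    match l1 with
    | x :: rest => zipOddsLoop rest l2 (i + 1) (payload ++ [x])
    | [] => payload ++ l2
  else
    match l2 with
    | y :: rest => zipOddsLoop l1 rest (i + 1) (payload ++ [y])
    | [] => payload ++ l1
termination_by l1.length + l2.length
decreasing_by all_goals (simp only [List.length_cons]; omega)

def zip_odds (a : List Int) (b : List Int) : List Int :=
  zipOddsLoop (get_odds a) (get_odds b) 0 []

-- ===== PORT B =====
def zip_odds_alt (a : List Int) (b : List Int) : List Int :=
  let l1 := a.filter (fun x => PySem.Int.mod x 2 == 1)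
  let l2 := b.filter (fun x => PySem.Int.mod x 2 == 1)
  let out := (l1.zip l2).foldl (fun acc pq => acc ++ [pq.1, pq.2]) []
  let n := min l1.length l2.length
  out ++ l1.drop n ++ l2.drop n    -- l1[n:] + l2[n:]

-- ===== PRECONDITION & SPEC =====
def Spec_zip_odds (a : List Int) (b : List Int) (out : List Int) : Prop := out = zip_odds_alt a b
instance (a : List Int) (b : List Int) (out : List Int) : Decidable (Spec_zip_odds a b out) := by unfold Spec_zip_odds; infer_instance

-- ===== CLAIM (what is proved, stated in full; the proofs are below) =====
def Claim_equal_zip_odds : Prop := ∀ (a : List Int) (b : List Int), Dom_zip_odds a b → Spec_zip_odds a b (zip_odds a b)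

-- ===== LEMMAS AND PROOFS =====

-- interleaving starting with l1 / starting with l2
mutual
def interA : List Int → List Int → List Int
  | [], l2 => l2
  | x :: r1, l2 => x :: interB r1 l2
def interB : List Int → List Int → List Int
  | l1, [] => l1
  | l1, y :: r2 => y :: interA l1 r2
end

theorem interA_nil_right : ∀ l1 : List Int, interA l1 [] = l1 := by
  intro l1; cases l1 <;> simp [interA, interB]

theorem zipOddsLoop_spec :
    ∀ (n : Nat) (l1 l2 : List Int) (i : Int) (p : List Int),
      l1.length + l2.length ≤ n →
      (PySem.Int.mod i 2 = 0 → zipOddsLoop l1 l2 i p = p ++ interA l1 l2) ∧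
      (PySem.Int.mod i 2 = 1 → zipOddsLoop l1 l2 i p = p ++ interB l1 l2) := by
  intro n
  induction n with
  | zero =>
    intro l1 l2 i p h
    have h1 : l1 = [] := by cases l1 <;> simp_all
    have h2 : l2 = [] := by cases l2 <;> simp_all
    subst h1; subst h2
    constructor <;> intro hi <;> (rw [zipOddsLoop.eq_def]; simp [hi, interA, interB])
  | succ n ih =>
    intro l1 l2 i p h
    have hm : PySem.Int.mod i 2 = i % 2 := PySem.Int.mod_eq_emod_of_pos (by norm_num)
    have hm1 : PySem.Int.mod (i+1) 2 = (i+1) % 2 := PySem.Int.mod_eq_emod_of_pos (by norm_num)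
    constructor
    · intro hi
      cases l1 with
      | nil => rw [zipOddsLoop.eq_def, hi]; simp [interA]
      | cons x r1 =>
        have hnext : PySem.Int.mod (i+1) 2 = 1 := by
          rw [hm1]; rw [hm] at hi; omega
        have hlen : r1.length + l2.length ≤ n := by
          simp only [List.length_cons] at h; omega
        have hrec := (ih r1 l2 (i+1) (p ++ [x]) hlen).2 hnext
        rw [zipOddsLoop.eq_def, hi]; simp [hrec, interA]
    · intro hi
      cases l2 with
      | nil => rw [zipOddsLoop.eq_def, hi]; simp [interB]
      | cons y r2 =>
        have hnext : PySem.Int.mod (i+1) 2 = 0 := by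
          rw [hm1]; rw [hm] at hi; omega
        have hlen : l1.length + r2.length ≤ n := by
          simp only [List.length_cons] at h; omega
        have hrec := (ih l1 r2 (i+1) (p ++ [y]) hlen).1 hnext
        rw [zipOddsLoop.eq_def, hi]; simp [hrec, interB]

theorem foldl_flat_acc :
    ∀ (l : List (Int × Int)) (acc : List Int),
      l.foldl (fun acc pq => acc ++ [pq.1, pq.2]) acc
        = acc ++ l.foldl (fun acc pq => acc ++ [pq.1, pq.2]) [] := by
  intro l
  induction l with
  | nil => simp
  | cons hd tl ih =>
    intro acc
    simp only [List.foldl_cons, List.nil_append]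
    rw [ih (acc ++ [hd.1, hd.2]), ih [hd.1, hd.2]]
    simp

theorem B_core :
    ∀ (l1 l2 : List Int),
      (l1.zip l2).foldl (fun acc pq => acc ++ [pq.1, pq.2]) []
        ++ l1.drop (min l1.length l2.length) ++ l2.drop (min l1.length l2.length)
      = interA l1 l2 := by
  intro l1
  induction l1 with
  | nil => intro l2; simp [interA]
  | cons x r1 ih =>
    intro l2
    cases l2 with
    | nil => simp [interA_nil_right, interA, interB]
    | cons y r2 =>
      simp only [List.zip_cons_cons, List.foldl_cons, List.length_cons]
      rw [foldl_flat_acc]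
      have : min (r1.length + 1) (r2.length + 1) = min r1.length r2.length + 1 := by omega
      rw [this]
      simp only [List.drop_succ_cons]
      simp [interA, interB, ← ih r2]

-- ===== VERDICT (by name: the statement is the Claim_ definition above) =====
theorem zip_odds_spec : Claim_equal_zip_odds := by
  intro a b _
  show zipOddsLoop (get_odds a) (get_odds b) 0 [] = _
  rw [(zipOddsLoop_spec ((get_odds a).length + (get_odds b).length) _ _ 0 [] le_rfl).1 (by decide)]
  rw [List.nil_append, ← B_core]
  rfl
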